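-- pv_equiv track=rewrite | github.com/sun-hainan/Python | 08_位运算/hamming_distance.py | hamming_distance_lookup
-- ===== SOURCE A (Python) =====
-- def hamming_distance_lookup(x: int, y: int) -> int:
--     """预计算查表法（适合频繁调用场景）"""
--     # 256项1字节popcount表
--     table = [bin(i).count('1') for i in range(256)]
--     diff = x ^ y
--     return (
--         table[diff & 0xFF] +
--         table[(diff >> 8) & 0xFF] +
--         table[(diff >> 16) & 0xFF] +
--         table[(diff >> 24) & 0xFF]
--     )
-- ===== SOURCE B (Python) =====
-- def hamming_distance_lookup(x: int, y: int) -> int: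
--     """Kernighan bit-clearing popcount on the masked 32-bit XOR."""
--     d = (x ^ y) & 0xFFFFFFFF
--     count = 0
--     while d:
--         d &= d - 1
--         count += 1
--     return count
-- ===== Notes on version B (the rewrite author's own statement) =====
-- stated objective: alternative
-- what changed: A rebuilds a 256-entry byte-popcount table on every call and sums four byte lookups of the XOR; B masks the XOR to 32 bits and counts set bits with Kernighan's bit-clearing loop (d &= d-1), with no table at all.
import Mathlib
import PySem

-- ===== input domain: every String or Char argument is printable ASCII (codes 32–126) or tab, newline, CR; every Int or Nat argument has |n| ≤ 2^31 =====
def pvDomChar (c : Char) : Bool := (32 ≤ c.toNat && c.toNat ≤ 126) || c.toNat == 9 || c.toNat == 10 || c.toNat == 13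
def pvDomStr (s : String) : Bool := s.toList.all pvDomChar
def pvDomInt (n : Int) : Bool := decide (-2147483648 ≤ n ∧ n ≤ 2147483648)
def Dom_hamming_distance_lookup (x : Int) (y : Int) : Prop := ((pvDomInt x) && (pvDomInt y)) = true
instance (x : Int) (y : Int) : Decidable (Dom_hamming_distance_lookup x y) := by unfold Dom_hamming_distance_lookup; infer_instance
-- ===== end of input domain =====

-- B replaces A's per-call 256-entry byte-popcount table and four lookups by Kernighan's
-- bit-clearing loop on the masked 32-bit XOR (objective: alternative algorithm, no table).

-- ===== PORT A =====
-- table = [bin(i).count('1') for i in range(256)]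
def pvTableA : List Int :=
  (PySem.List.pyRange 0 256 1).map (fun i => (PySem.Str.count (PySem.Int.pyBin i) "1" : Int))

-- table[e] is ported as pyGetD … 0: every index e below is (… & 0xFF), provably in [0, 256),
-- so Python's list indexing never raises and the default 0 is never taken (exact).
def hamming_distance_lookup (x : Int) (y : Int) : Int :=
  let table := pvTableA
  let diff := PySem.Int.bxor x y
  PySem.List.pyGetD table (PySem.Int.band diff 255) 0 +
  PySem.List.pyGetD table (PySem.Int.band (diff >>> (8 : Nat)) 255) 0 +
  PySem.List.pyGetD table (PySem.Int.band (diff >>> (16 : Nat)) 255) 0 +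
  PySem.List.pyGetD table (PySem.Int.band (diff >>> (24 : Nat)) 255) 0

-- ===== PORT B =====
-- while d: d &= d - 1; count += 1  — d starts at (x ^ y) & 0xFFFFFFFF, which is provably
-- nonnegative, so the loop state is carried as a Nat (exact; the Nat is the Python int).
def pvKernLoop (d : Nat) (count : Int) : Int :=
  if d = 0 then count else pvKernLoop (d &&& (d - 1)) (count + 1)
termination_by d
decreasing_by
  have h : d &&& (d - 1) ≤ d - 1 := Nat.and_le_right
  omega

def hamming_distance_lookup_alt (x : Int) (y : Int) : Int :=
  pvKernLoop (PySem.Int.band (PySem.Int.bxor x y) 4294967295).toNat 0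

-- ===== PRECONDITION & SPEC =====
def Spec_hamming_distance_lookup (x : Int) (y : Int) (out : Int) : Prop := out = hamming_distance_lookup_alt x y
instance (x : Int) (y : Int) (out : Int) : Decidable (Spec_hamming_distance_lookup x y out) := by unfold Spec_hamming_distance_lookup; infer_instance

-- ===== CLAIM (what is proved, stated in full; the proofs are below) =====
def Claim_equal_hamming_distance_lookup : Prop := ∀ (x : Int) (y : Int), Dom_hamming_distance_lookup x y → Spec_hamming_distance_lookup x y (hamming_distance_lookup x y)

-- ===== LEMMAS AND PROOFS =====

-- Reference popcount: Python's int.bit_count on a Nat.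
def pvBc (n : Nat) : Nat := PySem.Int.bitCount (n : Int)

theorem pvBc_zero : pvBc 0 = 0 := PySem.Int.bitCount_natCast_zero

theorem pvBc_succ (n : Nat) (h : 0 < n) : pvBc n = n % 2 + pvBc (n / 2) :=
  PySem.Int.bitCount_natCast h

theorem pvBc_two_mul (a : Nat) : pvBc (2 * a) = pvBc a := by
  rcases Nat.eq_zero_or_pos a with h | h
  · simp [h]
  · rw [pvBc_succ (2 * a) (by omega)]
    have h1 : 2 * a % 2 = 0 := by omega
    have h2 : 2 * a / 2 = a := by omega
    rw [h1, h2]; omega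

theorem pvBc_two_mul_add_one (a : Nat) : pvBc (2 * a + 1) = pvBc a + 1 := by
  rw [pvBc_succ (2 * a + 1) (by omega)]
  have h1 : (2 * a + 1) % 2 = 1 := by omega
  have h2 : (2 * a + 1) / 2 = a := by omega
  rw [h1, h2]; omega

theorem pvBc_pos (n : Nat) (h : 0 < n) : 0 < pvBc n := by
  induction n using Nat.strong_induction_on with
  | _ n ih =>
    rw [pvBc_succ n h]
    rcases Nat.eq_zero_or_pos (n % 2) with h2 | h2
    · have : 0 < n / 2 := by omega
      have := ih (n / 2) (by omega) this
      omega
    · omega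

theorem pv_land_odd (a : Nat) : (2 * a + 1) &&& (2 * a) = 2 * a := by
  apply Nat.eq_of_testBit_eq
  intro i
  rw [Nat.testBit_and]
  cases i with
  | zero => simp [Nat.testBit_zero]
  | succ i =>
    simp only [Nat.testBit_succ]
    have h1 : (2 * a + 1) / 2 = a := by omega
    have h2 : 2 * a / 2 = a := by omega
    rw [h1, h2, Bool.and_self]

theorem pv_land_even (a : Nat) (ha : 0 < a) :
    (2 * a) &&& (2 * a - 1) = 2 * (a &&& (a - 1)) := by
  apply Nat.eq_of_testBit_eq
  intro i
  rw [Nat.testBit_and]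
  cases i with
  | zero =>
    simp [Nat.testBit_zero]
  | succ i =>
    simp only [Nat.testBit_succ]
    have h1 : 2 * a / 2 = a := by omega
    have h2 : (2 * a - 1) / 2 = a - 1 := by omega
    have h3 : 2 * (a &&& (a - 1)) / 2 = a &&& (a - 1) := by omega
    rw [h1, h2, h3, Nat.testBit_and]

theorem pvBc_land_pred (n : Nat) (h : 0 < n) : pvBc (n &&& (n - 1)) = pvBc n - 1 := by
  induction n using Nat.strong_induction_on with
  | _ n ih =>
    rcases Nat.even_or_odd n with ⟨a, ha⟩ | ⟨a, ha⟩
    · -- n = 2a, a > 0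
      have ha' : 0 < a := by omega
      have hn : n = 2 * a := by omega
      subst hn
      rw [pv_land_even a ha', pvBc_two_mul, pvBc_two_mul]
      exact ih a (by omega) ha'
    · -- n = 2a + 1
      have hn : n = 2 * a + 1 := by omega
      subst hn
      have h1 : 2 * a + 1 - 1 = 2 * a := by omega
      rw [h1, pv_land_odd, pvBc_two_mul, pvBc_two_mul_add_one]
      omega

theorem pvKernLoop_eq (n : Nat) : ∀ c : Int, pvKernLoop n c = c + (pvBc n : Int) := by
  induction n using Nat.strong_induction_on with
  | _ n ih =>
    intro c
    rw [pvKernLoop]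
    by_cases h : n = 0
    · simp [h, pvBc_zero]
    · rw [if_neg h]
      have hlt : n &&& (n - 1) < n := by
        have := @Nat.and_le_right n (n - 1)
        omega
      rw [ih _ hlt]
      have h1 := pvBc_land_pred n (by omega)
      have h2 := pvBc_pos n (by omega)
      omega

theorem pvBc_split (k : Nat) : ∀ n : Nat, pvBc n = pvBc (n % 2 ^ k) + pvBc (n / 2 ^ k) := by
  induction k with
  | zero => intro n; rw [pow_zero, Nat.mod_one, Nat.div_one, pvBc_zero]; omega
  | succ k ih =>
    intro n
    rcases Nat.eq_zero_or_pos n with h | h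
    · simp [h, pvBc_zero]
    · have hmod : n % 2 ^ (k + 1) = n % 2 + 2 * (n / 2 % 2 ^ k) := by
        have h1 : (2 : Nat) ^ (k + 1) = 2 * 2 ^ k := by ring
        rw [h1, Nat.mod_mul]
      have hdiv : n / 2 ^ (k + 1) = n / 2 / 2 ^ k := by
        rw [Nat.div_div_eq_div_mul]; ring_nf
      rw [pvBc_succ n h, ih (n / 2), hmod, hdiv]
      have hm2 : n % 2 = 0 ∨ n % 2 = 1 := by omega
      rcases hm2 with h2 | h2
      · rw [h2]
        simp only [Nat.zero_add]
        rw [pvBc_two_mul]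
      · rw [h2]
        have : 1 + 2 * (n / 2 % 2 ^ k) = 2 * (n / 2 % 2 ^ k) + 1 := by omega
        rw [this, pvBc_two_mul_add_one]
        omega

theorem pvBc_le (k : Nat) : ∀ n : Nat, n < 2 ^ k → pvBc n ≤ k := by
  induction k with
  | zero => intro n h; have hn0 : n = 0 := by omega
            simp [hn0, pvBc_zero]
  | succ k ih =>
    intro n h
    rcases Nat.eq_zero_or_pos n with h0 | h0
    · simp [h0, pvBc_zero]
    · rw [pvBc_succ n h0]
      have hd : n / 2 < 2 ^ k := by
        have : (2 : Nat) ^ (k + 1) = 2 * 2 ^ k := by ring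
        omega
      have := ih (n / 2) hd
      omega

theorem pvBc_compl (k : Nat) : ∀ n : Nat, n < 2 ^ k → pvBc (2 ^ k - 1 - n) = k - pvBc n := by
  induction k with
  | zero => intro n h; have hn0 : n = 0 := by omega
            simp [hn0, pvBc_zero]
  | succ k ih =>
    intro n h
    have hpow : (2 : Nat) ^ (k + 1) = 2 * 2 ^ k := by ring
    have ha : n / 2 < 2 ^ k := by omega
    have harg : 2 ^ (k + 1) - 1 - n = 2 * (2 ^ k - 1 - n / 2) + (1 - n % 2) := by
      have h2 : n % 2 < 2 := Nat.mod_lt n (by omega)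
      have h3 : n = 2 * (n / 2) + n % 2 := (Nat.div_add_mod n 2).symm ▸ (by omega)
      have hp : (1 : Nat) ≤ 2 ^ k := Nat.one_le_two_pow
      omega
    have hle := pvBc_le k (n / 2) ha
    have hm2 : n % 2 = 0 ∨ n % 2 = 1 := by omega
    rcases hm2 with h2 | h2
    · -- n even
      rw [harg, h2]
      have : 2 * (2 ^ k - 1 - n / 2) + (1 - 0) = 2 * (2 ^ k - 1 - n / 2) + 1 := by omega
      rw [this, pvBc_two_mul_add_one, ih (n / 2) ha]
      rcases Nat.eq_zero_or_pos n with h0 | h0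
      · simp [h0, pvBc_zero] at *
      · rw [pvBc_succ n h0, h2]
        omega
    · -- n odd
      rw [harg, h2]
      have : 2 * (2 ^ k - 1 - n / 2) + (1 - 1) = 2 * (2 ^ k - 1 - n / 2) := by omega
      rw [this, pvBc_two_mul, ih (n / 2) ha]
      rw [pvBc_succ n (by omega), h2]
      omega

-- the table: entry i is the popcount of i, for 0 ≤ i < 256
set_option maxRecDepth 10000 in
set_option maxHeartbeats 2000000 in
theorem pvTableA_get : ∀ i : Nat, i < 2 ^ 8 → PySem.List.pyGetD pvTableA (i : Int) 0 = (pvBc i : Int) := by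
  decide

-- band with 255 / 0xFFFFFFFF, on casts of Nats and on -n-1
theorem pv_band_cast (m : Nat) (k : Nat) :
    PySem.Int.band (m : Int) ((2 ^ k - 1 : Nat) : Int) = ((m % 2 ^ k : Nat) : Int) := by
  rw [PySem.Int.band_natCast, Nat.and_two_pow_sub_one_eq_mod]

theorem pv_band_neg (m : Nat) (k : Nat) :
    PySem.Int.band (-(m : Int) - 1) ((2 ^ k - 1 : Nat) : Int) =
      ((2 ^ k - 1 - m % 2 ^ k : Nat) : Int) := by
  rw [PySem.Int.band.eq_1]
  have h1 : ¬ (0 ≤ -(m : Int) - 1) := by omega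
  have h2 : (0 : Int) ≤ ((2 ^ k - 1 : Nat) : Int) := by positivity
  rw [if_neg h1, if_pos h2]
  have h3 : (-(-(m : Int) - 1) - 1).toNat = m := by omega
  have h4 : (((2 ^ k - 1 : Nat) : Int)).toNat = 2 ^ k - 1 := by omega
  rw [h3, h4, Nat.and_comm, Nat.and_two_pow_sub_one_eq_mod]

-- shifts on casts of Nats and on -n-1 (Python's >> is Int's >>>)
theorem pv_shift_cast (n : Nat) (k : Nat) : ((n : Int)) >>> k = ((n >>> k : Nat) : Int) := rfl

theorem pv_shift_neg (n : Nat) (k : Nat) :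
    (-(n : Int) - 1) >>> k = -((n >>> k : Nat) : Int) - 1 := by
  have h : (-(n : Int) - 1) = Int.negSucc n := by rw [Int.negSucc_eq]; omega
  have h2 : (Int.negSucc n) >>> k = Int.negSucc (n >>> k) := rfl
  rw [h, h2, Int.negSucc_eq]; omega

theorem pv_shiftR_div (n k : Nat) : n >>> k = n / 2 ^ k := Nat.shiftRight_eq_div_pow n k

-- A's value when the XOR is a nonnegative n < 2^32
theorem pvA_pos (x y : Int) (n : Nat) (h : PySem.Int.bxor x y = (n : Int)) (hn : n < 2 ^ 32) :
    hamming_distance_lookup x y = (pvBc n : Int) := by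
  show PySem.List.pyGetD pvTableA (PySem.Int.band (PySem.Int.bxor x y) 255) 0 + _ + _ + _ = _
  rw [h]
  have h255 : (255 : Int) = ((2 ^ 8 - 1 : Nat) : Int) := by norm_num
  rw [pv_shift_cast n 8, pv_shift_cast n 16, pv_shift_cast n 24, h255,
    pv_band_cast n 8, pv_band_cast (n >>> 8) 8, pv_band_cast (n >>> 16) 8,
    pv_band_cast (n >>> 24) 8]
  rw [pvTableA_get _ (Nat.mod_lt _ (by norm_num)), pvTableA_get _ (Nat.mod_lt _ (by norm_num)),
    pvTableA_get _ (Nat.mod_lt _ (by norm_num)), pvTableA_get _ (Nat.mod_lt _ (by norm_num))]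
  rw [pv_shiftR_div, pv_shiftR_div, pv_shiftR_div]
  have e1 := pvBc_split 8 n
  have e2 := pvBc_split 8 (n / 2 ^ 8)
  have e3 := pvBc_split 8 (n / 2 ^ 16)
  have e8 := pvBc_split 8 (n / 2 ^ 24)
  have f1 : n / 2 ^ 8 / 2 ^ 8 = n / 2 ^ 16 := by rw [Nat.div_div_eq_div_mul]; norm_num
  have f2 : n / 2 ^ 16 / 2 ^ 8 = n / 2 ^ 24 := by rw [Nat.div_div_eq_div_mul]; norm_num
  have f3 : n / 2 ^ 24 / 2 ^ 8 = n / 2 ^ 32 := by rw [Nat.div_div_eq_div_mul]; norm_num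
  have f4 : n / 2 ^ 32 = 0 := Nat.div_eq_of_lt hn
  rw [f1] at e2
  rw [f2] at e3
  rw [f3, f4, pvBc_zero] at e8
  omega

-- A's value when the XOR is -n-1 with n < 2^32
theorem pvA_neg (x y : Int) (n : Nat) (h : PySem.Int.bxor x y = -(n : Int) - 1)
    (hn : n < 2 ^ 32) : hamming_distance_lookup x y = 32 - (pvBc n : Int) := by
  show PySem.List.pyGetD pvTableA (PySem.Int.band (PySem.Int.bxor x y) 255) 0 + _ + _ + _ = _
  rw [h]
  have h255 : (255 : Int) = ((2 ^ 8 - 1 : Nat) : Int) := by norm_num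
  rw [pv_shift_neg n 8, pv_shift_neg n 16, pv_shift_neg n 24, h255,
    pv_band_neg n 8, pv_band_neg (n >>> 8) 8, pv_band_neg (n >>> 16) 8,
    pv_band_neg (n >>> 24) 8]
  have hb : ∀ m : Nat, (2 : Nat) ^ 8 - 1 - m % 2 ^ 8 < 2 ^ 8 := by intro m; omega
  rw [pvTableA_get _ (hb n), pvTableA_get _ (hb (n >>> 8)), pvTableA_get _ (hb (n >>> 16)),
    pvTableA_get _ (hb (n >>> 24))]
  have hc : ∀ m : Nat, pvBc (2 ^ 8 - 1 - m % 2 ^ 8) = 8 - pvBc (m % 2 ^ 8) := by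
    intro m; exact pvBc_compl 8 (m % 2 ^ 8) (Nat.mod_lt _ (by norm_num))
  rw [hc n, hc (n >>> 8), hc (n >>> 16), hc (n >>> 24)]
  rw [pv_shiftR_div, pv_shiftR_div, pv_shiftR_div]
  have hl : ∀ m : Nat, pvBc (m % 2 ^ 8) ≤ 8 := fun m => pvBc_le 8 _ (Nat.mod_lt _ (by norm_num))
  have e1 := pvBc_split 8 n
  have e2 := pvBc_split 8 (n / 2 ^ 8)
  have e5 : n / 2 ^ 8 / 2 ^ 8 = n / 2 ^ 16 := by rw [Nat.div_div_eq_div_mul]; norm_num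
  rw [e5] at e2
  have e3 := pvBc_split 8 (n / 2 ^ 16)
  have e5' : n / 2 ^ 16 / 2 ^ 8 = n / 2 ^ 24 := by rw [Nat.div_div_eq_div_mul]; norm_num
  rw [e5'] at e3
  have e8 := pvBc_split 8 (n / 2 ^ 24)
  have e6 : n / 2 ^ 24 / 2 ^ 8 = n / 2 ^ 32 := by rw [Nat.div_div_eq_div_mul]; norm_num
  have e7 : n / 2 ^ 32 = 0 := Nat.div_eq_of_lt hn
  rw [e6, e7, pvBc_zero] at e8
  have k1 := hl n
  have k2 := hl (n / 2 ^ 8)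
  have k3 := hl (n / 2 ^ 16)
  have k4 := hl (n / 2 ^ 24)
  omega

-- B's value in the same two cases
theorem pvB_pos (x y : Int) (n : Nat) (h : PySem.Int.bxor x y = (n : Int)) (hn : n < 2 ^ 32) :
    hamming_distance_lookup_alt x y = (pvBc n : Int) := by
  show pvKernLoop (PySem.Int.band (PySem.Int.bxor x y) 4294967295).toNat 0 = _
  rw [h]
  have hM : (4294967295 : Int) = ((2 ^ 32 - 1 : Nat) : Int) := by norm_num
  rw [hM, pv_band_cast n 32, Nat.mod_eq_of_lt hn, Int.toNat_natCast, pvKernLoop_eq]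
  omega

theorem pvB_neg (x y : Int) (n : Nat) (h : PySem.Int.bxor x y = -(n : Int) - 1)
    (hn : n < 2 ^ 32) : hamming_distance_lookup_alt x y = 32 - (pvBc n : Int) := by
  show pvKernLoop (PySem.Int.band (PySem.Int.bxor x y) 4294967295).toNat 0 = _
  rw [h]
  have hM : (4294967295 : Int) = ((2 ^ 32 - 1 : Nat) : Int) := by norm_num
  rw [hM, pv_band_neg n 32, Nat.mod_eq_of_lt hn, Int.toNat_natCast, pvKernLoop_eq]
  rw [pvBc_compl 32 n hn]
  have := pvBc_le 32 n hn
  omega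

-- ===== VERDICT (by name: the statement is the Claim_ definition above) =====
theorem hamming_distance_lookup_spec : Claim_equal_hamming_distance_lookup := by
  intro x y hdom
  have hx : -2147483648 ≤ x ∧ x ≤ 2147483648 := by
    have := hdom
    unfold Dom_hamming_distance_lookup pvDomInt at this
    simp only [Bool.and_eq_true, decide_eq_true_eq] at this
    exact this.1
  have hy : -2147483648 ≤ y ∧ y ≤ 2147483648 := by
    have := hdom
    unfold Dom_hamming_distance_lookup pvDomInt at this
    simp only [Bool.and_eq_true, decide_eq_true_eq] at this
    exact this.2
  show hamming_distance_lookup x y = hamming_distance_lookup_alt x y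
  rcases (by omega : 0 ≤ x ∨ x < 0) with hx0 | hx0 <;> rcases (by omega : 0 ≤ y ∨ y < 0) with hy0 | hy0
  · -- both nonneg: xor is a Nat
    have h : PySem.Int.bxor x y = ((x.toNat ^^^ y.toNat : Nat) : Int) := by
      rw [PySem.Int.bxor.eq_1, if_pos hx0, if_pos hy0]
    have hn : x.toNat ^^^ y.toNat < 2 ^ 32 :=
      Nat.xor_lt_two_pow (by omega) (by omega)
    rw [pvA_pos x y _ h hn, pvB_pos x y _ h hn]
  · -- x ≥ 0, y < 0
    have h : PySem.Int.bxor x y = -((x.toNat ^^^ (-y - 1).toNat : Nat) : Int) - 1 := by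
      rw [PySem.Int.bxor.eq_1, if_pos hx0, if_neg (by omega)]
    have hn : x.toNat ^^^ (-y - 1).toNat < 2 ^ 32 :=
      Nat.xor_lt_two_pow (by omega) (by omega)
    rw [pvA_neg x y _ h hn, pvB_neg x y _ h hn]
  · -- x < 0, y ≥ 0
    have h : PySem.Int.bxor x y = -(((-x - 1).toNat ^^^ y.toNat : Nat) : Int) - 1 := by
      rw [PySem.Int.bxor.eq_1, if_neg (by omega), if_pos hy0]
    have hn : (-x - 1).toNat ^^^ y.toNat < 2 ^ 32 :=
      Nat.xor_lt_two_pow (by omega) (by omega)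
    rw [pvA_neg x y _ h hn, pvB_neg x y _ h hn]
  · -- both negative: xor is a Nat
    have h : PySem.Int.bxor x y = (((-x - 1).toNat ^^^ (-y - 1).toNat : Nat) : Int) := by
      rw [PySem.Int.bxor.eq_1, if_neg (by omega), if_neg (by omega)]
    have hn : (-x - 1).toNat ^^^ (-y - 1).toNat < 2 ^ 32 :=
      Nat.xor_lt_two_pow (by omega) (by omega)
    rw [pvA_pos x y _ h hn, pvB_pos x y _ h hn]
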